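-- pv_equiv track=rewrite | github.com/roeselfa/FeatureLearningBasedDistanceMetrics | Evaluation/AdvancedBA.py | getPrecedesRelations
-- ===== SOURCE A (Python) =====
-- def getPredecessorsOfEventInTrace(event, trace):
--     predecessors = list()
--     if event not in trace:
--         return predecessors
--
--     eventIndex = max(loc for loc, val in enumerate(trace) if val == event)
--     restTrace = trace[:eventIndex]
--
--     for e in restTrace:
--         if e not in predecessors:
--             predecessors.append(e)
--
--     return predecessors
--
-- def getPrecedesRelations(allEvents, traces):
--     precedesMatrix = {}
--
--     for event in allEvents:
--         alwaysPrecedes = allEvents.copy()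
--         neverPrecedes = allEvents.copy()
--
--         for eClmn in allEvents:
--             precedesMatrix[(event, eClmn)] = 'S'
--
--         for trace in traces:
--             if event in trace:
--                 predecessors = getPredecessorsOfEventInTrace(event, trace)
--                 for p in predecessors:
--                     if p in neverPrecedes:
--                         neverPrecedes.remove(p)
--
--                 for e in allEvents:
--                     if e not in predecessors:
--                         if e in alwaysPrecedes:
--                             alwaysPrecedes.remove(e)
--
--         for a in alwaysPrecedes:
--             precedesMatrix[(event, a)] = 'A'
--
--         for n in neverPrecedes:
--             precedesMatrix[(event, n)] = 'N'
--
--     return precedesMatrix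
-- ===== SOURCE B (Python) =====
-- def getPrecedesRelations(allEvents, traces):
--     result = {}
--     for event in allEvents:
--         predSets = []
--         for trace in traces:
--             if event in trace:
--                 cut = len(trace) - 1 - trace[::-1].index(event)
--                 predSets.append(set(trace[:cut]))
--         for c in allEvents:
--             if all(c not in s for s in predSets):
--                 result[(event, c)] = 'N'
--             elif all(c in s for s in predSets):
--                 result[(event, c)] = 'A'
--             else:
--                 result[(event, c)] = 'S'
--     return result
-- ===== Notes on version B (the rewrite author's own statement) =====
-- stated objective: alternative
-- what changed: Per event, B builds one predecessor set per trace and classifies each cell directly by an all-in / all-not-in test, instead of A's mutable always/never copies of allEvents pruned with linear remove scans and an S-then-overwrite dict pass; same asymptotics were not certified in a timing run, so no speed is claimed.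
import Mathlib
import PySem

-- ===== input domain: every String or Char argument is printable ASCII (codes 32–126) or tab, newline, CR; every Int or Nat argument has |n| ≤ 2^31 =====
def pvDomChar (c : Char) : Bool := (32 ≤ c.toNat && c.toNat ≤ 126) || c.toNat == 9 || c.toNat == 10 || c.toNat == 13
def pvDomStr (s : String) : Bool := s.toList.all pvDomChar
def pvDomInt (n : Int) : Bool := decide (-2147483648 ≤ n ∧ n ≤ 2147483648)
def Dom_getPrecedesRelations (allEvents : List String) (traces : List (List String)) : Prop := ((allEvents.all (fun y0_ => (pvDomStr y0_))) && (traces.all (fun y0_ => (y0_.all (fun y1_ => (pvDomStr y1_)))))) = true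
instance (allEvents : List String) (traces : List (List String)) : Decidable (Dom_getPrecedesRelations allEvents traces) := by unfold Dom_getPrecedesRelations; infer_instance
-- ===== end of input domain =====

-- B replaces A's mutable always/never event lists (pruned by linear remove scans per trace) and the
-- 'S'-then-overwrite dict passes by per-trace predecessor sets and a direct all-in/all-not-in label per cell.
-- ===== PORT A =====
def getPredecessorsOfEventInTrace (event : String) (trace : List String) : List String :=
  if event ∉ trace then []
  else
    -- eventIndex = max(loc for loc, val in enumerate(trace) if val == event);
    -- max() of a generator that is nonempty here (event ∈ trace), so the .getD 0 default is unreachable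
    let eventIndex : Int :=
      (PySem.List.max? ((PySem.List.enumerate trace 0).foldl
        (fun acc p => if p.2 == event then acc ++ [p.1] else acc) []) (fun x => x)).getD 0
    let restTrace := PySem.List.slice trace none (some eventIndex)
    restTrace.foldl (fun preds e => if e ∈ preds then preds else preds ++ [e]) []

def getPrecedesRelations (allEvents : List String) (traces : List (List String)) : List (String × String × String) :=
  let precedesMatrix : PySem.Dict (String × String) String :=
    allEvents.foldl (fun m event =>
      let m := allEvents.foldl (fun m eClmn => m.insert (event, eClmn) "S") m
      let st := traces.foldl (fun (st : List String × List String) trace =>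
        if event ∈ trace then
          let predecessors := getPredecessorsOfEventInTrace event trace
          -- list.remove(p) guarded by 'p in …': remove? cannot fail, .getD is the unwrap
          let neverPrecedes := predecessors.foldl
            (fun nv p => if p ∈ nv then (PySem.List.remove? nv p).getD nv else nv) st.2
          let alwaysPrecedes := allEvents.foldl
            (fun av e => if e ∉ predecessors then (if e ∈ av then (PySem.List.remove? av e).getD av else av) else av) st.1
          (alwaysPrecedes, neverPrecedes)
        else st) (allEvents, allEvents)
      let m := st.1.foldl (fun m a => m.insert (event, a) "A") m
      st.2.foldl (fun m n => m.insert (event, n) "N") m)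
      PySem.Dict.empty
  precedesMatrix.items.map (fun q => (q.1.1, q.1.2, q.2))

-- ===== PORT B =====
def getPrecedesRelations_alt (allEvents : List String) (traces : List (List String)) : List (String × String × String) :=
  let result : PySem.Dict (String × String) String :=
    allEvents.foldl (fun m event =>
      -- trace[::-1] is trace.reverse (PySem.List.slice?_none_none_neg_one); .index is guarded by 'event in trace',
      -- so index?.getD 0 is the unwrap; trace[:cut] with cut : Nat is trace.take cut (PySem.List.slice_to_natCast)
      let predSets : List (PySem.Set String) := traces.foldl (fun acc trace =>
        if event ∈ trace then
          let cut := trace.length - 1 - (PySem.List.index? trace.reverse event).getD 0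
          acc ++ [PySem.Set.ofList (trace.take cut)]
        else acc) []
      allEvents.foldl (fun m c =>
        if predSets.all (fun s => !(PySem.Set.contains s c)) then m.insert (event, c) "N"
        else if predSets.all (fun s => PySem.Set.contains s c) then m.insert (event, c) "A"
        else m.insert (event, c) "S") m) PySem.Dict.empty
  result.items.map (fun q => (q.1.1, q.1.2, q.2))

-- ===== PRECONDITION & SPEC =====
-- Pre_ excludes allEvents lists with duplicate entries: there A's always/never copies are multisets and its
-- one-removal-per-trace bookkeeping gives labels that depend on occurrence counts, a corner no caller would specify.
def Pre_getPrecedesRelations (allEvents : List String) (traces : List (List String)) : Prop := allEvents.Nodup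
instance (allEvents : List String) (traces : List (List String)) : Decidable (Pre_getPrecedesRelations allEvents traces) := by unfold Pre_getPrecedesRelations; infer_instance
def pvWitness_getPrecedesRelations : List String × List (List String) := (["a", "b"], [["a", "b"], ["b", "c"]])
def Spec_getPrecedesRelations (allEvents : List String) (traces : List (List String)) (out : List (String × String × String)) : Prop := out = getPrecedesRelations_alt allEvents traces
instance (allEvents : List String) (traces : List (List String)) (out : List (String × String × String)) : Decidable (Spec_getPrecedesRelations allEvents traces out) := by unfold Spec_getPrecedesRelations; infer_instance

-- ===== CLAIM (what is proved, stated in full; the proofs are below) =====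
def Claim_equal_getPrecedesRelations : Prop := ∀ (allEvents : List String) (traces : List (List String)), Dom_getPrecedesRelations allEvents traces → Pre_getPrecedesRelations allEvents traces → Spec_getPrecedesRelations allEvents traces (getPrecedesRelations allEvents traces)

-- ===== LEMMAS AND PROOFS =====

def lastIdx (event : String) (tr : List String) : Nat :=
  tr.length - 1 - (PySem.List.index? tr.reverse event).getD 0

theorem lastIdx_spec (event : String) (tr : List String) (h : event ∈ tr) :
    ∃ hlt : lastIdx event tr < tr.length,
      tr[lastIdx event tr]'hlt = event ∧ ∀ j (hj : j < tr.length), lastIdx event tr < j → tr[j]'hj ≠ event := by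
  have hrev : event ∈ tr.reverse := by simpa using h
  obtain ⟨k, hk⟩ : ∃ k, PySem.List.index? tr.reverse event = some k :=
    Option.isSome_iff_exists.mp ((PySem.List.index?_isSome_iff _ _).mpr hrev)
  obtain ⟨hklt, hget, hfirst⟩ := PySem.List.getElem_of_index?_eq_some hk
  have hlen : tr.reverse.length = tr.length := by simp
  have hklt' : k < tr.length := hlen ▸ hklt
  have hne : tr ≠ [] := by rintro rfl; simp at h
  have hlenpos : 0 < tr.length := List.length_pos_iff.mpr hne
  have hli : lastIdx event tr = tr.length - 1 - k := by rw [lastIdx, hk]; rfl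
  have hlt : lastIdx event tr < tr.length := by omega
  refine ⟨hlt, ?_, ?_⟩
  · have := List.getElem_reverse (l := tr) (i := k) (by simpa using hklt)
    rw [this] at hget
    simpa [hli] using hget
  · intro j hj hgt
    have hj' : tr.length - 1 - j < k := by omega
    have := hfirst (tr.length - 1 - j) (by omega)
    rw [List.getElem_reverse (by simp; omega)] at this
    intro hc
    apply this
    rw [← hc]
    congr 1
    omega

theorem mem_locs_iff (event : String) (tr : List String) (y : Int) :
    y ∈ (PySem.List.enumerate tr 0).foldl
        (fun acc p => if p.2 == event then acc ++ [p.1] else acc) [] ↔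
      ∃ (k : Nat) (hk : k < tr.length), tr[k] = event ∧ y = (k : Int) := by
  rw [PySem.List.foldl_append_if]
  simp only [List.nil_append, List.mem_map, List.mem_filter]
  constructor
  · rintro ⟨p, ⟨hpmem, hpev⟩, rfl⟩
    rcases (PySem.List.mem_enumerate_iff _ _ _).mp hpmem with ⟨k, hk, rfl⟩
    exact ⟨k, hk, by simpa using hpev, by simp⟩
  · rintro ⟨k, hk, hev, rfl⟩
    refine ⟨((k : Int), tr[k]), ⟨?_, by simpa using hev⟩, rfl⟩
    exact (PySem.List.mem_enumerate_iff _ _ _).mpr ⟨k, hk, by simp⟩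

theorem maxLoc_eq (event : String) (tr : List String) (h : event ∈ tr) :
    (PySem.List.max? ((PySem.List.enumerate tr 0).foldl
        (fun acc p => if p.2 == event then acc ++ [p.1] else acc) []) (fun x => x)).getD 0
      = ((lastIdx event tr : Nat) : Int) := by
  obtain ⟨hlt, hget, hlast⟩ := lastIdx_spec event tr h
  have hmem : ((lastIdx event tr : Nat) : Int) ∈ (PySem.List.enumerate tr 0).foldl
      (fun acc p => if p.2 == event then acc ++ [p.1] else acc) [] :=
    (mem_locs_iff event tr _).mpr ⟨lastIdx event tr, hlt, hget, rfl⟩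
  set L : List Int := (PySem.List.enumerate tr 0).foldl
      (fun acc p => if p.2 == event then acc ++ [p.1] else acc) [] with hL
  obtain ⟨m, hm⟩ : ∃ m, PySem.List.max? L (fun x => x) = some m := by
    cases hcase : PySem.List.max? L (fun x : Int => x) with
    | none => exact absurd ((PySem.List.max?_eq_none_iff _ _).mp hcase ▸ hmem) (List.not_mem_nil)
    | some m => exact ⟨m, rfl⟩
  have hmmem := PySem.List.max?_mem hm
  have hmax := PySem.List.max?_isMax hm
  rcases (mem_locs_iff event tr m).mp hmmem with ⟨k, hk, hkev, rfl⟩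
  have h1 : (k : Int) ≤ (lastIdx event tr : Int) := by
    by_contra hc
    rw [not_le] at hc
    have : lastIdx event tr < k := by exact_mod_cast hc
    exact hlast k hk this hkev
  have h2 : ((lastIdx event tr : Nat) : Int) ≤ (k : Int) := hmax _ hmem
  have : (k : Int) = ((lastIdx event tr : Nat) : Int) := le_antisymm h1 h2
  rw [hm, Option.getD_some, this]

theorem dedup_fold_eq (xs : List String) :
    xs.foldl (fun preds e => if e ∈ preds then preds else preds ++ [e]) [] = PySem.Set.ofList xs := by
  rw [PySem.Set.ofList_eq_foldl]
  apply PySem.List.foldl_congr_mem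
  intro acc x hx
  by_cases hmem : x ∈ acc <;> simp [PySem.Set.add, PySem.Set.contains, hmem]

theorem predecessors_eq (event : String) (tr : List String) (h : event ∈ tr) :
    getPredecessorsOfEventInTrace event tr = PySem.Set.ofList (tr.take (lastIdx event tr)) := by
  rw [getPredecessorsOfEventInTrace]
  rw [if_neg (by simpa using h)]
  simp only [maxLoc_eq event tr h, PySem.List.slice_to_natCast, dedup_fold_eq]

theorem guarded_remove_eq_erase (nv : List String) (p : String) :
    (if p ∈ nv then (PySem.List.remove? nv p).getD nv else nv) = nv.erase p := by
  by_cases hmem : p ∈ nv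
  · rw [if_pos hmem, PySem.List.remove?_eq_some_erase nv p hmem, Option.getD_some]
  · rw [if_neg hmem, List.erase_of_not_mem hmem]

theorem foldl_erase_eq_filter (P : List String) (l : List String) (hnd : l.Nodup) (q : String → Bool) :
    P.foldl (fun nv p => nv.erase p) (l.filter q)
      = l.filter (fun c => q c && !(decide (c ∈ P))) := by
  induction P generalizing q with
  | nil => simp
  | cons p P ih =>
    simp only [List.foldl_cons]
    rw [List.Nodup.erase_eq_filter (hnd.filter q) p, List.filter_filter, ih]
    apply List.filter_congr
    intro c _
    by_cases h1 : c = p <;> by_cases h2 : c ∈ P <;> simp [h1, h2]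

theorem foldl_erase_filter (P : List String) (q : String → Bool) (l : List String) (hnd : l.Nodup) :
    P.foldl (fun nv p => if p ∈ nv then (PySem.List.remove? nv p).getD nv else nv) (l.filter q)
      = l.filter (fun c => q c && !(decide (c ∈ P))) := by
  rw [show (fun (nv : List String) p => if p ∈ nv then (PySem.List.remove? nv p).getD nv else nv)
      = fun nv p => nv.erase p from funext fun nv => funext fun p => guarded_remove_eq_erase nv p]
  exact foldl_erase_eq_filter P l hnd q

theorem foldl_keep_aux (P : List String) (l' : List String) (av : List String) (hnd : av.Nodup) :
    l'.foldl (fun av e => if e ∉ P then (if e ∈ av then (PySem.List.remove? av e).getD av else av) else av) av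
      = av.filter (fun c => decide (c ∈ P) || !(decide (c ∈ l'))) := by
  induction l' generalizing av with
  | nil => simp
  | cons e l' ih =>
    simp only [List.foldl_cons]
    by_cases hP : e ∈ P
    · rw [if_neg (by simpa using hP), ih av hnd]
      apply List.filter_congr
      intro c _
      by_cases h1 : c = e <;> by_cases h2 : c ∈ P <;> by_cases h3 : c ∈ l' <;>
        simp [h1, h2, h3] <;> simp_all
    · rw [if_pos hP, guarded_remove_eq_erase, ih _ (hnd.erase e),
        List.Nodup.erase_eq_filter hnd e, List.filter_filter]
      apply List.filter_congr
      intro c _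
      by_cases h1 : c = e <;> by_cases h2 : c ∈ P <;> by_cases h3 : c ∈ l' <;>
        simp [h1, h2, h3] <;> simp_all

theorem foldl_keep_filter (P : List String) (q : String → Bool) (l : List String) (hnd : l.Nodup) :
    l.foldl (fun av e => if e ∉ P then (if e ∈ av then (PySem.List.remove? av e).getD av else av) else av) (l.filter q)
      = l.filter (fun c => q c && decide (c ∈ P)) := by
  rw [foldl_keep_aux P l (l.filter q) (hnd.filter q), List.filter_filter]
  apply List.filter_congr
  intro c hc
  by_cases h1 : c ∈ P <;> simp [h1, hc]

def predsSpec (event : String) (traces : List (List String)) : List (List String) :=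
  (traces.filter (fun t => decide (event ∈ t))).map (fun t => PySem.Set.ofList (t.take (lastIdx event t)))

theorem traceLoop_aux (allEvents : List String) (hnd : allEvents.Nodup) (event : String)
    (traces : List (List String)) (qA qN : String → Bool) :
    traces.foldl (fun (st : List String × List String) trace =>
        if event ∈ trace then
          let predecessors := getPredecessorsOfEventInTrace event trace
          let neverPrecedes := predecessors.foldl
            (fun nv p => if p ∈ nv then (PySem.List.remove? nv p).getD nv else nv) st.2
          let alwaysPrecedes := allEvents.foldl
            (fun av e => if e ∉ predecessors then (if e ∈ av then (PySem.List.remove? av e).getD av else av) else av) st.1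
          (alwaysPrecedes, neverPrecedes)
        else st) (allEvents.filter qA, allEvents.filter qN)
      = (allEvents.filter (fun c => qA c && (predsSpec event traces).all (fun P => decide (c ∈ P))),
         allEvents.filter (fun c => qN c && (predsSpec event traces).all (fun P => !(decide (c ∈ P))))) := by
  induction traces generalizing qA qN with
  | nil => simp [predsSpec]
  | cons t ts ih =>
    simp only [List.foldl_cons]
    by_cases ht : event ∈ t
    · rw [if_pos ht]
      simp only [predecessors_eq event t ht]
      rw [show (PySem.Set.ofList (t.take (lastIdx event t)) : List String).foldl
            (fun nv p => if p ∈ nv then (PySem.List.remove? nv p).getD nv else nv) (allEvents.filter qN)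
          = allEvents.filter (fun c => qN c && !(decide (c ∈ (PySem.Set.ofList (t.take (lastIdx event t)) : List String))))
          from foldl_erase_filter _ qN allEvents hnd]
      rw [show allEvents.foldl
            (fun av e => if e ∉ (PySem.Set.ofList (t.take (lastIdx event t)) : List String) then
              (if e ∈ av then (PySem.List.remove? av e).getD av else av) else av) (allEvents.filter qA)
          = allEvents.filter (fun c => qA c && decide (c ∈ (PySem.Set.ofList (t.take (lastIdx event t)) : List String)))
          from foldl_keep_filter _ qA allEvents hnd]
      rw [ih]
      have hps : predsSpec event (t :: ts) = PySem.Set.ofList (t.take (lastIdx event t)) :: predsSpec event ts := by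
        simp [predsSpec, ht]
      rw [hps]
      simp only [Prod.mk.injEq]
      refine ⟨?_, ?_⟩ <;>
      · apply List.filter_congr
        intro c _
        simp [Bool.and_assoc]
    · rw [if_neg ht, ih]
      have hps : predsSpec event (t :: ts) = predsSpec event ts := by simp [predsSpec, ht]
      rw [hps]

theorem contains_false_of_fresh (m : PySem.Dict (String × String) String) (event c : String)
    (hfresh : ∀ p ∈ m.items, p.1.1 ≠ event) : m.contains (event, c) = false := by
  rw [← Bool.not_eq_true, PySem.Dict.contains_iff_mem_keys]
  intro hmem
  have : (event, c) ∈ m.items.map (·.1) := hmem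
  rcases List.mem_map.mp this with ⟨p, hp, hpe⟩
  exact hfresh p hp (by rw [hpe])

theorem overwrite_items (event v : String) (sub allEvents : List String)
    (hsub : ∀ c ∈ sub, c ∈ allEvents)
    (d : PySem.Dict (String × String) String) (base : List ((String × String) × String))
    (hbk : ∀ p ∈ base, p.1.1 ≠ event) (f : String → String)
    (hd : d.items = base ++ allEvents.map (fun c => ((event, c), f c))) :
    (sub.foldl (fun d c => d.insert (event, c) v) d).items
      = base ++ allEvents.map (fun c => ((event, c), if c ∈ sub then v else f c)) := by
  induction sub generalizing d f with
  | nil => simpa using hd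
  | cons c sub ih =>
    simp only [List.foldl_cons]
    have hcontains : d.contains (event, c) = true := by
      rw [PySem.Dict.contains_iff_mem_keys]
      have : ((event, c), f c) ∈ d.items := by
        rw [hd]
        exact List.mem_append_right _ (List.mem_map_of_mem (hsub c (by simp)))
      show (event, c) ∈ d.items.map (·.1)
      exact List.mem_map_of_mem this
    have hitems : (d.insert (event, c) v).items
        = base ++ allEvents.map (fun c' => ((event, c'), if c' = c then v else f c')) := by
      rw [PySem.Dict.items_insert_of_contains d v hcontains, hd, List.map_append]
      congr 1
      · rw [show base = base.map id from (List.map_id base).symm]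
        rw [List.map_map]
        apply List.map_congr_left
        intro p hp
        have : (p.1 == (event, c)) = false := by
          have := hbk p hp
          have hne : p.1 ≠ (event, c) := by
            intro hc; exact this (by rw [hc])
          simpa using hne
        simp only [Function.comp_apply, id_eq, this, Bool.false_eq_true, if_false]
      · rw [List.map_map]
        apply List.map_congr_left
        intro c' _
        by_cases h1 : c' = c <;> simp [h1]
    rw [ih (fun c hc => hsub c (by simp [hc])) _ _ hitems]
    congr 1
    apply List.map_congr_left
    intro c' _
    by_cases h1 : c' = c <;> by_cases h2 : c' ∈ sub <;> simp [h1, h2]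

def labelOf (ps : List (List String)) (c : String) : String :=
  if ps.all (fun P => !(decide (c ∈ P))) then "N"
  else if ps.all (fun P => decide (c ∈ P)) then "A" else "S"

theorem traceLoop_eq (allEvents : List String) (hnd : allEvents.Nodup) (event : String)
    (traces : List (List String)) :
    traces.foldl (fun (st : List String × List String) trace =>
        if event ∈ trace then
          let predecessors := getPredecessorsOfEventInTrace event trace
          let neverPrecedes := predecessors.foldl
            (fun nv p => if p ∈ nv then (PySem.List.remove? nv p).getD nv else nv) st.2
          let alwaysPrecedes := allEvents.foldl
            (fun av e => if e ∉ predecessors then (if e ∈ av then (PySem.List.remove? av e).getD av else av) else av) st.1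
          (alwaysPrecedes, neverPrecedes)
        else st) (allEvents, allEvents)
      = (allEvents.filter (fun c => (predsSpec event traces).all (fun P => decide (c ∈ P))),
         allEvents.filter (fun c => (predsSpec event traces).all (fun P => !(decide (c ∈ P))))) := by
  have h0 : allEvents = allEvents.filter (fun _ => true) := (List.filter_true allEvents).symm
  rw [show ((allEvents, allEvents) : List String × List String)
      = (allEvents.filter (fun _ => true), allEvents.filter (fun _ => true)) by rw [← h0]]
  rw [traceLoop_aux allEvents hnd event traces (fun _ => true) (fun _ => true)]
  simp

theorem rowA_items (allEvents : List String) (hnd : allEvents.Nodup) (event : String)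
    (traces : List (List String)) (m : PySem.Dict (String × String) String)
    (hfresh : ∀ p ∈ m.items, p.1.1 ≠ event) :
    ((let m := allEvents.foldl (fun m eClmn => m.insert (event, eClmn) "S") m
      let st := traces.foldl (fun (st : List String × List String) trace =>
        if event ∈ trace then
          let predecessors := getPredecessorsOfEventInTrace event trace
          let neverPrecedes := predecessors.foldl
            (fun nv p => if p ∈ nv then (PySem.List.remove? nv p).getD nv else nv) st.2
          let alwaysPrecedes := allEvents.foldl
            (fun av e => if e ∉ predecessors then (if e ∈ av then (PySem.List.remove? av e).getD av else av) else av) st.1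
          (alwaysPrecedes, neverPrecedes)
        else st) (allEvents, allEvents)
      let m := st.1.foldl (fun m a => m.insert (event, a) "A") m
      st.2.foldl (fun m n => m.insert (event, n) "N") m) : PySem.Dict (String × String) String).items
    = m.items ++ allEvents.map (fun c => ((event, c), labelOf (predsSpec event traces) c)) := by
  dsimp only
  rw [traceLoop_eq allEvents hnd event traces]
  have hS : (allEvents.foldl (fun m eClmn => m.insert (event, eClmn) "S") m).items
      = m.items ++ allEvents.map (fun c => ((event, c), "S")) := by
    exact PySem.Dict.items_foldl_insert_fresh allEvents (fun c => (event, c)) (fun _ => "S") m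
      (fun c _ => contains_false_of_fresh m event c hfresh)
      (List.Nodup.map_on (fun a _ b _ h => by simpa using h) hnd)
  have hA := overwrite_items event "A"
    (allEvents.filter (fun c => (predsSpec event traces).all (fun P => decide (c ∈ P)))) allEvents
    (fun c hc => (List.mem_filter.mp hc).1) _ m.items hfresh (fun _ => "S") hS
  have hN := overwrite_items event "N"
    (allEvents.filter (fun c => (predsSpec event traces).all (fun P => !(decide (c ∈ P))))) allEvents
    (fun c hc => (List.mem_filter.mp hc).1) _ m.items hfresh _ hA
  rw [hN]
  congr 1
  apply List.map_congr_left
  intro c hc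
  by_cases h1 : (predsSpec event traces).all (fun P => !(decide (c ∈ P))) = true <;>
    by_cases h2 : (predsSpec event traces).all (fun P => decide (c ∈ P)) = true <;>
      simp [labelOf, List.mem_filter, hc, h1, h2]

theorem rowB_items (allEvents : List String) (hnd : allEvents.Nodup) (event : String)
    (traces : List (List String)) (m : PySem.Dict (String × String) String)
    (hfresh : ∀ p ∈ m.items, p.1.1 ≠ event) :
    ((let predSets : List (PySem.Set String) := traces.foldl (fun acc trace =>
        if event ∈ trace then
          let cut := trace.length - 1 - (PySem.List.index? trace.reverse event).getD 0
          acc ++ [PySem.Set.ofList (trace.take cut)]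
        else acc) []
      allEvents.foldl (fun m c =>
        if predSets.all (fun s => !(PySem.Set.contains s c)) then m.insert (event, c) "N"
        else if predSets.all (fun s => PySem.Set.contains s c) then m.insert (event, c) "A"
        else m.insert (event, c) "S") m) : PySem.Dict (String × String) String).items
    = m.items ++ allEvents.map (fun c => ((event, c), labelOf (predsSpec event traces) c)) := by
  dsimp only
  have hps : traces.foldl (fun acc trace =>
        if event ∈ trace then
          acc ++ [PySem.Set.ofList (trace.take (trace.length - 1 - (PySem.List.index? trace.reverse event).getD 0))]
        else acc) ([] : List (PySem.Set String)) = predsSpec event traces := by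
    rw [PySem.List.foldl_append_ite (fun (t : List String) => event ∈ t)
      (fun (t : List String) => PySem.Set.ofList (List.take (t.length - 1 - (PySem.List.index? t.reverse event).getD 0) t))]
    rfl
  rw [hps]
  have hcongr : ∀ (d : PySem.Dict (String × String) String) (c : String),
      (if (predsSpec event traces).all (fun s => !(PySem.Set.contains s c)) then d.insert (event, c) "N"
       else if (predsSpec event traces).all (fun s => PySem.Set.contains s c) then d.insert (event, c) "A"
       else d.insert (event, c) "S") = d.insert (event, c) (labelOf (predsSpec event traces) c) := by
    intro d c
    by_cases h1 : (predsSpec event traces).all (fun P => !(decide (c ∈ P))) = true <;>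
      by_cases h2 : (predsSpec event traces).all (fun P => decide (c ∈ P)) = true <;>
        simp [labelOf, PySem.Set.contains, h1, h2]
  rw [show (fun (d : PySem.Dict (String × String) String) (c : String) =>
      if (predsSpec event traces).all (fun s => !(PySem.Set.contains s c)) then d.insert (event, c) "N"
      else if (predsSpec event traces).all (fun s => PySem.Set.contains s c) then d.insert (event, c) "A"
      else d.insert (event, c) "S")
      = (fun d c => d.insert (event, c) (labelOf (predsSpec event traces) c))
      from funext fun d => funext fun c => hcongr d c]
  exact PySem.Dict.items_foldl_insert_fresh allEvents (fun c => (event, c))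
    (fun c => labelOf (predsSpec event traces) c) m
    (fun c _ => contains_false_of_fresh m event c hfresh)
    (List.Nodup.map_on (fun a _ b _ h => by simpa using h) hnd)

theorem foldA_items (allEvents : List String) (hnd : allEvents.Nodup) (traces : List (List String)) :
    ∀ (r : List String), r.Nodup → ∀ (m : PySem.Dict (String × String) String),
      (∀ e ∈ r, ∀ p ∈ m.items, p.1.1 ≠ e) →
      (r.foldl (fun m event =>
        let m := allEvents.foldl (fun m eClmn => m.insert (event, eClmn) "S") m
        let st := traces.foldl (fun (st : List String × List String) trace =>
          if event ∈ trace then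
            let predecessors := getPredecessorsOfEventInTrace event trace
            let neverPrecedes := predecessors.foldl
              (fun nv p => if p ∈ nv then (PySem.List.remove? nv p).getD nv else nv) st.2
            let alwaysPrecedes := allEvents.foldl
              (fun av e => if e ∉ predecessors then (if e ∈ av then (PySem.List.remove? av e).getD av else av) else av) st.1
            (alwaysPrecedes, neverPrecedes)
          else st) (allEvents, allEvents)
        let m := st.1.foldl (fun m a => m.insert (event, a) "A") m
        st.2.foldl (fun m n => m.insert (event, n) "N") m) m).items
      = m.items ++ r.flatMap (fun ev => allEvents.map (fun c => ((ev, c), labelOf (predsSpec ev traces) c))) := by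
  intro r
  induction r with
  | nil => intro _ m _; simp
  | cons ev r ih =>
    intro hr m hf
    simp only [List.foldl_cons]
    rw [ih hr.of_cons _ ?_]
    · rw [rowA_items allEvents hnd ev traces m (hf ev (by simp))]
      simp [List.flatMap_cons, List.append_assoc]
    · intro e he p hp
      rw [rowA_items allEvents hnd ev traces m (hf ev (by simp))] at hp
      rcases List.mem_append.mp hp with h | h
      · exact hf e (by simp [he]) p h
      · rcases List.mem_map.mp h with ⟨c, _, rfl⟩
        have : ev ≠ e := fun hc => (List.nodup_cons.mp hr).1 (hc ▸ he)
        simpa using this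

theorem foldB_items (allEvents : List String) (hnd : allEvents.Nodup) (traces : List (List String)) :
    ∀ (r : List String), r.Nodup → ∀ (m : PySem.Dict (String × String) String),
      (∀ e ∈ r, ∀ p ∈ m.items, p.1.1 ≠ e) →
      (r.foldl (fun m event =>
        let predSets : List (PySem.Set String) := traces.foldl (fun acc trace =>
          if event ∈ trace then
            let cut := trace.length - 1 - (PySem.List.index? trace.reverse event).getD 0
            acc ++ [PySem.Set.ofList (trace.take cut)]
          else acc) []
        allEvents.foldl (fun m c =>
          if predSets.all (fun s => !(PySem.Set.contains s c)) then m.insert (event, c) "N"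
          else if predSets.all (fun s => PySem.Set.contains s c) then m.insert (event, c) "A"
          else m.insert (event, c) "S") m) m).items
      = m.items ++ r.flatMap (fun ev => allEvents.map (fun c => ((ev, c), labelOf (predsSpec ev traces) c))) := by
  intro r
  induction r with
  | nil => intro _ m _; simp
  | cons ev r ih =>
    intro hr m hf
    simp only [List.foldl_cons]
    rw [ih hr.of_cons _ ?_]
    · rw [rowB_items allEvents hnd ev traces m (hf ev (by simp))]
      simp [List.flatMap_cons, List.append_assoc]
    · intro e he p hp
      rw [rowB_items allEvents hnd ev traces m (hf ev (by simp))] at hp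
      rcases List.mem_append.mp hp with h | h
      · exact hf e (by simp [he]) p h
      · rcases List.mem_map.mp h with ⟨c, _, rfl⟩
        have : ev ≠ e := fun hc => (List.nodup_cons.mp hr).1 (hc ▸ he)
        simpa using this

-- ===== VERDICT (by name: the statement is the Claim_ definition above) =====
theorem getPrecedesRelations_spec : Claim_equal_getPrecedesRelations := by
  intro allEvents traces _ hpre
  unfold Spec_getPrecedesRelations
  rw [getPrecedesRelations, getPrecedesRelations_alt]
  dsimp only
  have hf : ∀ e ∈ allEvents, ∀ p ∈ (PySem.Dict.empty : PySem.Dict (String × String) String).items, p.1.1 ≠ e := by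
    simp [PySem.Dict.empty]
  congr 1
  rw [foldA_items allEvents hpre traces allEvents hpre PySem.Dict.empty hf,
      foldB_items allEvents hpre traces allEvents hpre PySem.Dict.empty hf]
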